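-- pv_equiv track=rewrite | github.com/vHalenka/TM_DataEnhancer | main.py | thermometer_to_integer
-- ===== SOURCE A (Python) =====
-- def thermometer_to_integer(thermometer_bits, negated = 0):
--     value = 0
--     thermometer_bits_local = thermometer_bits
--     length = len(thermometer_bits_local)
--     for bit in range(length):
--         if not negated:
--             if thermometer_bits_local[bit]:
--                 value = bit+1
--         else:
--             if thermometer_bits_local[bit]:
--                 value = bit +1
--                 break
--             value = length+1 #if all bits are 0, return max value
--     return value
-- ===== SOURCE B (Python) =====
-- def thermometer_to_integer(thermometer_bits, negated=0):
--     positions = [i for i, b in enumerate(thermometer_bits) if b]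
--     if not negated:
--         return positions[-1] + 1 if positions else 0
--     if positions:
--         return positions[0] + 1
--     return len(thermometer_bits) + 1 if thermometer_bits else 0
-- ===== Notes on version B (the rewrite author's own statement) =====
-- stated objective: alternative
-- what changed: Replaces the index-loop that maintains a running value (with an early break in the negated branch) by one materialized list of set-bit indices followed by an O(1) last/first selection with explicit empty-case handling.
import Mathlib
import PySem

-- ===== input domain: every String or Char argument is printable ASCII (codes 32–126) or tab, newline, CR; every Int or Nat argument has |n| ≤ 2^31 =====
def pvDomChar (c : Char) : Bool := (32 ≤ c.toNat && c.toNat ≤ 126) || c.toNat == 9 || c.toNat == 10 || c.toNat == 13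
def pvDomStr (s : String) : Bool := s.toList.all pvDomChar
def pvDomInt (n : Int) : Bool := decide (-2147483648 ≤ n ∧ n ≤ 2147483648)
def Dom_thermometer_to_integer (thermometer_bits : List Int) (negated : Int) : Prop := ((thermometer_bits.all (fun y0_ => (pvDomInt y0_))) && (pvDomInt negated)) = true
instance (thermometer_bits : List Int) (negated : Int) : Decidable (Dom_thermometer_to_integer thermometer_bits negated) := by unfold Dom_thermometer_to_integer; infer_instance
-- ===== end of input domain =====

-- B replaces A's running-value index loop (with early break in the negated branch) by one pass
-- collecting the set-bit positions and then an O(1) first/last selection (objective: alternative).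


-- ===== PORT A =====
-- the for-loop over range(length), with 'value' as state; the negated branch's 'break'
-- is the non-recursive return in the second branch
def tiGo (bits : List Int) (negated : Int) (length : Int) : List Int → Int → Int
  | [], value => value
  | bit :: rest, value =>
    if negated = 0 then
      if PySem.List.pyGetD bits bit 0 ≠ 0 then tiGo bits negated length rest (bit + 1)
      else tiGo bits negated length rest value
    else
      if PySem.List.pyGetD bits bit 0 ≠ 0 then bit + 1
      else tiGo bits negated length rest (length + 1)

def thermometer_to_integer (thermometer_bits : List Int) (negated : Int) : Int :=
  let length : Int := thermometer_bits.length
  tiGo thermometer_bits negated length (PySem.List.pyRange 0 length 1) 0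

-- ===== PORT B =====
def thermometer_to_integer_alt (thermometer_bits : List Int) (negated : Int) : Int :=
  let positions : List Int :=
    (PySem.List.enumerate thermometer_bits).filterMap
      (fun ib => if ib.2 ≠ 0 then some ib.1 else none)
  if negated = 0 then
    match positions.getLast? with
    | some p => p + 1
    | none => 0
  else
    match positions.head? with
    | some p => p + 1
    | none => if thermometer_bits ≠ [] then (thermometer_bits.length : Int) + 1 else 0

-- ===== PRECONDITION & SPEC =====
def Spec_thermometer_to_integer (thermometer_bits : List Int) (negated : Int) (out : Int) : Prop := out = thermometer_to_integer_alt thermometer_bits negated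
instance (thermometer_bits : List Int) (negated : Int) (out : Int) : Decidable (Spec_thermometer_to_integer thermometer_bits negated out) := by unfold Spec_thermometer_to_integer; infer_instance

-- ===== CLAIM (what is proved, stated in full; the proofs are below) =====
def Claim_equal_thermometer_to_integer : Prop := ∀ (thermometer_bits : List Int) (negated : Int), Dom_thermometer_to_integer thermometer_bits negated → Spec_thermometer_to_integer thermometer_bits negated (thermometer_to_integer thermometer_bits negated)

-- ===== LEMMAS AND PROOFS =====

-- shorthand for B's comprehension filter
def pvG : Int × Int → Option Int := fun ib => if ib.2 ≠ 0 then some ib.1 else none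

-- indexing the concatenation at the split point
theorem pvGetD_split (pre : List Int) (b : Int) (t : List Int) :
    PySem.List.pyGetD (pre ++ b :: t) ((pre.length : Int)) 0 = b := by
  rw [PySem.List.pyGetD_natCast]
  simp [List.getD]

-- non-negated branch: the loop from index pre.length computes the last set position (+1), default v
theorem pvL0 (suffix : List Int) : ∀ (pre : List Int) (v : Int),
    tiGo (pre ++ suffix) 0 ((pre ++ suffix).length) (PySem.List.pyRange (pre.length) ((pre ++ suffix).length) 1) v
      = (match ((PySem.List.enumerate suffix (pre.length)).filterMap pvG).getLast? with
         | some p => p + 1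
         | none => v) := by
  induction suffix with
  | nil =>
    intro pre v
    rw [List.append_nil, PySem.List.pyRange_one_eq_nil (le_refl _)]
    rfl
  | cons b t ih =>
    intro pre v
    have hlt : (pre.length : Int) < ((pre ++ b :: t).length : Int) := by
      simp
    rw [PySem.List.pyRange_one_cons hlt, tiGo]
    rw [if_pos rfl, pvGetD_split]
    have hre : pre ++ b :: t = (pre ++ [b]) ++ t := by simp
    have hlen : ((pre ++ [b]).length : Int) = (pre.length : Int) + 1 := by simp
    have key : ∀ w : Int,
        tiGo (pre ++ b :: t) 0 ((pre ++ b :: t).length) (PySem.List.pyRange ((pre.length : Int) + 1) ((pre ++ b :: t).length) 1) w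
          = (match ((PySem.List.enumerate t ((pre.length : Int) + 1)).filterMap pvG).getLast? with
             | some p => p + 1
             | none => w) := by
      intro w
      have h := ih (pre ++ [b]) w
      rw [← hre, hlen] at h
      exact h
    rw [PySem.List.enumerate_cons, List.filterMap_cons]
    by_cases hb : b = 0
    · have hcond : ¬ ((b : Int) ≠ 0) := by simp [hb]
      rw [if_neg hcond, key v]
      have : pvG ((pre.length : Int), b) = none := by simp [pvG, hb]
      rw [this]
    · have hcond : (b : Int) ≠ 0 := hb
      rw [if_pos hcond, key ((pre.length : Int) + 1)]
      have : pvG ((pre.length : Int), b) = some (pre.length : Int) := by simp [pvG, hb]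
      rw [this, List.getLast?_cons]
      cases h : ((PySem.List.enumerate t ((pre.length : Int) + 1)).filterMap pvG).getLast? with
      | none => rfl
      | some p => rfl

-- negated branch: the loop from index pre.length computes the first set position (+1);
-- an all-zero nonempty suffix gives length+1; an empty range gives v
theorem pvL1 (suffix : List Int) (negated : Int) (hneg : negated ≠ 0) : ∀ (pre : List Int) (v : Int),
    tiGo (pre ++ suffix) negated ((pre ++ suffix).length) (PySem.List.pyRange (pre.length) ((pre ++ suffix).length) 1) v
      = (match ((PySem.List.enumerate suffix (pre.length)).filterMap pvG).head? with
         | some p => p + 1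
         | none => if suffix = [] then v else ((pre ++ suffix).length : Int) + 1) := by
  induction suffix with
  | nil =>
    intro pre v
    rw [List.append_nil, PySem.List.pyRange_one_eq_nil (le_refl _)]
    rfl
  | cons b t ih =>
    intro pre v
    have hlt : (pre.length : Int) < ((pre ++ b :: t).length : Int) := by
      simp
    rw [PySem.List.pyRange_one_cons hlt, tiGo]
    rw [if_neg hneg, pvGetD_split]
    rw [PySem.List.enumerate_cons, List.filterMap_cons]
    by_cases hb : b = 0
    · have hcond : ¬ ((b : Int) ≠ 0) := by simp [hb]
      rw [if_neg hcond]
      have hre : pre ++ b :: t = (pre ++ [b]) ++ t := by simp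
      have hlen : ((pre ++ [b]).length : Int) = (pre.length : Int) + 1 := by simp
      have h := ih (pre ++ [b]) (((pre ++ b :: t).length : Int) + 1)
      rw [← hre, hlen] at h
      rw [h]
      have : pvG ((pre.length : Int), b) = none := by simp [pvG, hb]
      rw [this]
      cases hh : ((PySem.List.enumerate t ((pre.length : Int) + 1)).filterMap pvG).head? with
      | some p => rfl
      | none =>
        by_cases ht : t = []
        · simp [ht]
        · simp [ht]
    · have hcond : (b : Int) ≠ 0 := hb
      rw [if_pos hcond]
      have : pvG ((pre.length : Int), b) = some (pre.length : Int) := by simp [pvG, hb]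
      rw [this]
      rfl

-- ===== VERDICT (by name: the statement is the Claim_ definition above) =====
theorem thermometer_to_integer_spec : Claim_equal_thermometer_to_integer := by
  intro bits negated _
  unfold Spec_thermometer_to_integer thermometer_to_integer thermometer_to_integer_alt
  by_cases hneg : negated = 0
  · subst hneg
    have h := pvL0 bits [] 0
    simp only [List.nil_append, List.length_nil, Nat.cast_zero] at h
    rw [h, if_pos rfl]
    rfl
  · have h := pvL1 bits negated hneg [] 0
    simp only [List.nil_append, List.length_nil, Nat.cast_zero] at h
    rw [h, if_neg hneg]
    show (match ((PySem.List.enumerate bits 0).filterMap pvG).head? with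
          | some p => p + 1
          | none => if bits = [] then (0:Int) else (bits.length : Int) + 1)
       = (match ((PySem.List.enumerate bits).filterMap pvG).head? with
          | some p => p + 1
          | none => if bits ≠ [] then (bits.length : Int) + 1 else 0)
    cases hh : ((PySem.List.enumerate bits 0).filterMap pvG).head? with
    | some p => rfl
    | none => by_cases hb : bits = [] <;> simp [hb]
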